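-- pv_equiv track=rewrite | github.com/xx3nvyxx/challenges | codejam/2008/Qualification Round/B/TrainTimetable.py | TrainTimetable
-- ===== SOURCE A (Python) =====
-- def TrainTimetable(AB, BA):
--     A = 0
--     minA = 0
--     B = 0
--     minB = 0
--     for h in range(24):
--         for m in range(60):
--             dA = len([t for t in AB if t[0] == (h,m)])
--             aA = len([t for t in BA if t[1] == (h,m)])
--             A = A - dA + aA
--             dB = len([t for t in BA if t[0] == (h,m)])
--             aB = len([t for t in AB if t[1] == (h,m)])
--             B = B - dB + aB
--             minA = min(minA, A)
--             minB = min(minB, B)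
--     return str(abs(minA)) + " " + str(abs(minB))
-- ===== SOURCE B (Python) =====
-- def TrainTimetable(AB, BA):
--     # Sweep the distinct event minutes in sorted order instead of scanning
--     # every trip list once per each of the 1440 minutes of the day.
--     def minute(t):
--         h, m = t
--         return h * 60 + m if 0 <= h < 24 and 0 <= m < 60 else None
--
--     def need(deps, arrs):
--         # deps: trips departing from this station; arrs: trips arriving here.
--         d = {}
--         for trip in deps:
--             k = minute(trip[0])
--             if k is not None:
--                 d[k] = d.get(k, 0) - 1
--         for trip in arrs:
--             k = minute(trip[1])
--             if k is not None:
--                 d[k] = d.get(k, 0) + 1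
--         cur = 0
--         lo = 0
--         for k in sorted(d):
--             cur += d[k]
--             lo = min(lo, cur)
--         return -lo
--
--     return str(need(AB, BA)) + " " + str(need(BA, AB))
-- ===== Notes on version B (the rewrite author's own statement) =====
-- stated objective: faster
-- what changed: Instead of scanning both trip lists once for every one of the 1440 minutes of the day, B builds one dict of per-minute net deltas per station in a single pass over the trips and sweeps only the distinct event minutes in sorted order, tracking the running balance and its minimum.
import Mathlib
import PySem

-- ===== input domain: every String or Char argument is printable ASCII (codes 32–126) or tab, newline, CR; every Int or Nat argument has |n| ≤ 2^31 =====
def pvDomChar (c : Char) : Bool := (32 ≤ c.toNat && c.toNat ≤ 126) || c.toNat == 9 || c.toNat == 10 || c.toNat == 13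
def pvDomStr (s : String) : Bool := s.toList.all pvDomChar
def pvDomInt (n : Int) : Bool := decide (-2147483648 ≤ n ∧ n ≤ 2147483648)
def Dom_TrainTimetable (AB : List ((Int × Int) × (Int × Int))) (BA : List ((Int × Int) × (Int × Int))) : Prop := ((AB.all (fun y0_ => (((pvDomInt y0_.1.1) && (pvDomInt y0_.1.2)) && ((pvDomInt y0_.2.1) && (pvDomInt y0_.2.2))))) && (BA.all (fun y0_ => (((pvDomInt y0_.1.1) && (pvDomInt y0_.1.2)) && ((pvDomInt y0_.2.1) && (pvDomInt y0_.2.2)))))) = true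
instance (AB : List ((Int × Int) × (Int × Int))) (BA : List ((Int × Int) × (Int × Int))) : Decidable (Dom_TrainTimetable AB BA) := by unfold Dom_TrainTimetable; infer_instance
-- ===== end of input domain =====

-- B replaces A's scan of both trip lists at each of the 1440 minutes by one dict of
-- per-minute deltas swept over its sorted keys (objective: faster, asymptotic).

-- ===== PORT A =====
-- Literal transliteration of A: for each (h, m) count matching departures/arrivals
-- by filtering the lists, update the two running balances and minima.
def TrainTimetable (AB : List ((Int × Int) × (Int × Int))) (BA : List ((Int × Int) × (Int × Int))) : String :=
  let s := (PySem.List.pyRange 0 24).foldl (fun s h =>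
    (PySem.List.pyRange 0 60).foldl (fun s m =>
      let dA : Int := (AB.filter (fun t => t.1 == (h, m))).length
      let aA : Int := (BA.filter (fun t => t.2 == (h, m))).length
      let A := s.1 - dA + aA
      let dB : Int := (BA.filter (fun t => t.1 == (h, m))).length
      let aB : Int := (AB.filter (fun t => t.2 == (h, m))).length
      let B := s.2.2.1 - dB + aB
      (A, min s.2.1 A, B, min s.2.2.2 B)) s) ((0 : Int), (0 : Int), (0 : Int), (0 : Int))
  PySem.Int.toStr |s.2.1| ++ " " ++ PySem.Int.toStr |s.2.2.2|

-- ===== PORT B =====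
-- helper `minute` of Source B: index of a valid clock time, None otherwise
def pvMinute (t : Int × Int) : Option Int :=
  if 0 ≤ t.1 ∧ t.1 < 24 ∧ 0 ≤ t.2 ∧ t.2 < 60 then some (t.1 * 60 + t.2) else none

-- helper `need` of Source B: dict of per-minute deltas, swept over its sorted keys.
-- (`d[k]` with k drawn from d's keys always succeeds in Python; ported as getD.)
def pvNeed (deps arrs : List ((Int × Int) × (Int × Int))) : Int :=
  let d : PySem.Dict Int Int := deps.foldl (fun d trip =>
      match pvMinute trip.1 with
      | some k => d.insert k (d.getD k 0 - 1)
      | none => d) PySem.Dict.empty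
  let d := arrs.foldl (fun d trip =>
      match pvMinute trip.2 with
      | some k => d.insert k (d.getD k 0 + 1)
      | none => d) d
  let s := (PySem.List.sorted d.keys (fun x => x) false).foldl
      (fun s k => let cur := s.1 + d.getD k 0; (cur, min s.2 cur)) ((0 : Int), (0 : Int))
  Neg.neg s.2

def TrainTimetable_alt (AB : List ((Int × Int) × (Int × Int))) (BA : List ((Int × Int) × (Int × Int))) : String :=
  PySem.Int.toStr (pvNeed AB BA) ++ " " ++ PySem.Int.toStr (pvNeed BA AB)

-- ===== PRECONDITION & SPEC =====
def Spec_TrainTimetable (AB : List ((Int × Int) × (Int × Int))) (BA : List ((Int × Int) × (Int × Int))) (out : String) : Prop := out = TrainTimetable_alt AB BA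
instance (AB : List ((Int × Int) × (Int × Int))) (BA : List ((Int × Int) × (Int × Int))) (out : String) : Decidable (Spec_TrainTimetable AB BA out) := by unfold Spec_TrainTimetable; infer_instance

-- ===== CLAIM (what is proved, stated in full; the proofs are below) =====
def Claim_equal_TrainTimetable : Prop := ∀ (AB : List ((Int × Int) × (Int × Int))) (BA : List ((Int × Int) × (Int × Int))), Dom_TrainTimetable AB BA → Spec_TrainTimetable AB BA (TrainTimetable AB BA)

-- ===== LEMMAS AND PROOFS =====

-- the net per-minute change of trains parked at a station
def pvDelta (deps arrs : List ((Int × Int) × (Int × Int))) (t : Int) : Int :=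
  (arrs.countP (fun p => pvMinute p.2 == some t) : Int)
    - (deps.countP (fun p => pvMinute p.1 == some t) : Int)

-- one sweep step: running balance and running minimum
def pvSweep (dl : Int → Int) (s : Int × Int) (t : Int) : Int × Int :=
  (s.1 + dl t, min s.2 (s.1 + dl t))

-- the full day, minute by minute, as minute indices
def pvLmins : List Int :=
  (PySem.List.pyRange 0 24).flatMap (fun h => (PySem.List.pyRange 0 60).map (fun m => h * 60 + m))

lemma pvMinute_bound {x : Int × Int} {t : Int} (h : pvMinute x = some t) : 0 ≤ t ∧ t < 1440 := by
  unfold pvMinute at h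
  split at h
  · rename_i hv; injection h with h'; omega
  · exact absurd h (by simp)

lemma mem_pvLmins {t : Int} : t ∈ pvLmins ↔ 0 ≤ t ∧ t < 1440 := by
  unfold pvLmins
  simp only [List.mem_flatMap, List.mem_map, PySem.List.mem_pyRange_one]
  constructor
  · rintro ⟨h, hh, m, hm, rfl⟩; omega
  · rintro ⟨h0, h1⟩; exact ⟨t / 60, by omega, t % 60, by omega, by omega⟩

lemma pairwise_pvLmins : pvLmins.Pairwise (· < ·) := by
  unfold pvLmins
  rw [List.pairwise_flatMap]
  constructor
  · intro h _
    exact (List.pairwise_map).mpr ((PySem.List.pairwise_lt_pyRange_one 0 60).imp (fun hab => by omega))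
  · refine (PySem.List.pairwise_lt_pyRange_one 0 24).imp ?_
    intro a b hab x hx y hy
    simp only [List.mem_map, PySem.List.mem_pyRange_one] at hx hy
    obtain ⟨m1, hm1, rfl⟩ := hx; obtain ⟨m2, hm2, rfl⟩ := hy; omega

lemma getD_depfold (l : List ((Int × Int) × (Int × Int))) (d : PySem.Dict Int Int) (t : Int) :
    (l.foldl (fun d trip =>
        match pvMinute trip.1 with
        | some k => d.insert k (d.getD k 0 - 1)
        | none => d) d).getD t 0
      = d.getD t 0 - (l.countP (fun p => pvMinute p.1 == some t) : Int) := by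
  induction l generalizing d with
  | nil => simp
  | cons x l ih =>
    simp only [List.foldl_cons, List.countP_cons]
    cases hk : pvMinute x.1 with
    | none => simp [ih]
    | some k =>
      rw [ih]
      by_cases ht : t = k
      · subst ht; rw [PySem.Dict.getD_insert]; simp; ring
      · simp [PySem.Dict.getD_insert, ht, Ne.symm ht]

lemma getD_arrfold (l : List ((Int × Int) × (Int × Int))) (d : PySem.Dict Int Int) (t : Int) :
    (l.foldl (fun d trip =>
        match pvMinute trip.2 with
        | some k => d.insert k (d.getD k 0 + 1)
        | none => d) d).getD t 0
      = d.getD t 0 + (l.countP (fun p => pvMinute p.2 == some t) : Int) := by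
  induction l generalizing d with
  | nil => simp
  | cons x l ih =>
    simp only [List.foldl_cons, List.countP_cons]
    cases hk : pvMinute x.2 with
    | none => simp [ih]
    | some k =>
      rw [ih]
      by_cases ht : t = k
      · subst ht; rw [PySem.Dict.getD_insert]; simp; ring
      · simp [PySem.Dict.getD_insert, ht, Ne.symm ht]

lemma contains_foldl (l : List ((Int × Int) × (Int × Int))) (key : ((Int × Int) × (Int × Int)) → Option Int)
    (g : PySem.Dict Int Int → Int → Int) (d : PySem.Dict Int Int) (t : Int) :
    (l.foldl (fun d x =>
        match key x with
        | some k => d.insert k (g d k)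
        | none => d) d).contains t
      = (d.contains t || l.any (fun x => key x == some t)) := by
  induction l generalizing d with
  | nil => simp
  | cons x l ih =>
    simp only [List.foldl_cons, List.any_cons]
    cases hk : key x with
    | none => simp [ih]
    | some k =>
      rw [ih, PySem.Dict.contains_insert]
      by_cases ht : t = k
      · subst ht; simp
      · simp [beq_eq_false_iff_ne.mpr ht, beq_eq_false_iff_ne.mpr (Ne.symm ht)]
    
lemma nodup_keys_foldl (l : List ((Int × Int) × (Int × Int))) (key : ((Int × Int) × (Int × Int)) → Option Int)
    (g : PySem.Dict Int Int → Int → Int) (d : PySem.Dict Int Int) (h : d.keys.Nodup) :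
    (l.foldl (fun d x =>
        match key x with
        | some k => d.insert k (g d k)
        | none => d) d).keys.Nodup := by
  induction l generalizing d with
  | nil => exact h
  | cons x l ih =>
    simp only [List.foldl_cons]
    cases hk : key x with
    | none => exact ih _ h
    | some k => exact ih _ (PySem.Dict.nodup_keys_insert _ _ _ h)

lemma sweep_skip (dl : Int → Int) (P : Int → Bool) (L : List Int)
    (h0 : ∀ t ∈ L, P t = false → dl t = 0) :
    ∀ s : Int × Int, s.2 ≤ s.1 →
      L.foldl (pvSweep dl) s = (L.filter P).foldl (pvSweep dl) s := by
  induction L with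
  | nil => intro s _; rfl
  | cons t L ih =>
    intro s hs
    simp only [List.foldl_cons, List.filter_cons]
    cases hP : P t with
    | false =>
      have hz := h0 t (by simp) hP
      have : pvSweep dl s t = s := by
        simp [pvSweep, hz, min_eq_left hs]
      rw [this]
      exact ih (fun u hu => h0 u (by simp [hu])) s hs
    | true =>
      exact ih (fun u hu => h0 u (by simp [hu])) _ (by simp [pvSweep])

lemma sweep_snd_le (dl : Int → Int) (L : List Int) :
    ∀ s : Int × Int, (L.foldl (pvSweep dl) s).2 ≤ s.2 := by
  induction L with
  | nil => intro s; exact le_refl _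
  | cons t L ih =>
    intro s
    exact le_trans (ih _) (by simp [pvSweep])

lemma foldl4 (L : List Int) (f g : (Int × Int) → Int → (Int × Int)) :
    ∀ p q : Int × Int,
      L.foldl (fun s t => ((f (s.1, s.2.1) t).1, (f (s.1, s.2.1) t).2,
                           (g (s.2.2.1, s.2.2.2) t).1, (g (s.2.2.1, s.2.2.2) t).2)) (p.1, p.2, q.1, q.2)
        = ((L.foldl f p).1, (L.foldl f p).2, (L.foldl g q).1, (L.foldl g q).2) := by
  induction L with
  | nil => intro p q; rfl
  | cons t L ih =>
    intro p q
    simp only [List.foldl_cons]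
    have := ih (f p t) (g q t)
    simpa using this

lemma minute_code_eq {h m : Int} (hh : 0 ≤ h ∧ h < 24) (hm : 0 ≤ m ∧ m < 60) (x : Int × Int) :
    (x == (h, m)) = (pvMinute x == some (h * 60 + m)) := by
  obtain ⟨a, b⟩ := x
  rw [Bool.eq_iff_iff]
  simp only [beq_iff_eq, Prod.mk.injEq, pvMinute]
  split
  · rename_i hv; simp only [Option.some_inj]; constructor
    · rintro ⟨rfl, rfl⟩; rfl
    · intro he; omega
  · rename_i hv; simp only [reduceCtorEq, iff_false]; rintro ⟨rfl, rfl⟩; exact hv ⟨hh.1, hh.2, hm.1, hm.2⟩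

lemma count_dep_eq {h m : Int} (hh : 0 ≤ h ∧ h < 24) (hm : 0 ≤ m ∧ m < 60)
    (l : List ((Int × Int) × (Int × Int))) :
    (l.filter (fun t => t.1 == (h, m))).length = l.countP (fun p => pvMinute p.1 == some (h * 60 + m)) := by
  rw [← List.countP_eq_length_filter]
  exact List.countP_congr (fun p _ => by rw [minute_code_eq hh hm])

lemma count_arr_eq {h m : Int} (hh : 0 ≤ h ∧ h < 24) (hm : 0 ≤ m ∧ m < 60)
    (l : List ((Int × Int) × (Int × Int))) :
    (l.filter (fun t => t.2 == (h, m))).length = l.countP (fun p => pvMinute p.2 == some (h * 60 + m)) := by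
  rw [← List.countP_eq_length_filter]
  exact List.countP_congr (fun p _ => by rw [minute_code_eq hh hm])

-- B's `need` equals the full-day sweep of the same delta function
lemma pvNeed_eq_sweep (deps arrs : List ((Int × Int) × (Int × Int))) :
    pvNeed deps arrs = |(pvLmins.foldl (pvSweep (pvDelta deps arrs)) ((0 : Int), (0 : Int))).2| := by
  simp only [pvNeed]
  set d1 : PySem.Dict Int Int := deps.foldl (fun d trip =>
      match pvMinute trip.1 with
      | some k => d.insert k (d.getD k 0 - 1)
      | none => d) PySem.Dict.empty with hd1
  set d : PySem.Dict Int Int := arrs.foldl (fun d trip =>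
      match pvMinute trip.2 with
      | some k => d.insert k (d.getD k 0 + 1)
      | none => d) d1 with hd
  have hg : ∀ t, d.getD t 0 = pvDelta deps arrs t := by
    intro t
    rw [hd, getD_arrfold, hd1, getD_depfold]
    simp [pvDelta, PySem.Dict.getD_empty]; ring
  have hc : ∀ t, d.contains t
      = (deps.any (fun p => pvMinute p.1 == some t) || arrs.any (fun p => pvMinute p.2 == some t)) := by
    intro t
    rw [hd, contains_foldl arrs (fun p => pvMinute p.2) (fun d k => d.getD k 0 + 1),
        hd1, contains_foldl deps (fun p => pvMinute p.1) (fun d k => d.getD k 0 - 1)]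
    simp
  have hnodup : d.keys.Nodup := by
    rw [hd]
    exact nodup_keys_foldl _ _ _ _ (by rw [hd1]; exact nodup_keys_foldl _ _ _ _ (by simp))
  -- the sorted keys are the full day filtered to the dict's keys
  have hmemK : ∀ t, t ∈ d.keys ↔ (d.contains t = true) := fun t => (PySem.Dict.contains_iff_mem_keys d t).symm
  have hbound : ∀ t, d.contains t = true → 0 ≤ t ∧ t < 1440 := by
    intro t ht
    rw [hc] at ht
    rcases Bool.or_eq_true_iff.mp ht with h' | h' <;>
      · obtain ⟨p, _, hp⟩ := List.any_eq_true.mp h'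
        exact pvMinute_bound (beq_iff_eq.mp hp)
  have hsorted : PySem.List.sorted d.keys (fun x => x) false = pvLmins.filter (fun t => d.contains t) := by
    apply PySem.List.sorted_eq_of_perm_of_pairwise_lt
    · apply (List.perm_ext_iff_of_nodup (pairwise_pvLmins.nodup.filter _) hnodup).mpr
      intro t
      rw [List.mem_filter, mem_pvLmins, hmemK]
      constructor
      · rintro ⟨_, h'⟩; exact h'
      · intro h'; exact ⟨hbound t h', h'⟩
    · exact pairwise_pvLmins.filter _
  have hstep : (fun (s : Int × Int) k => ((s.1 + d.getD k 0, min s.2 (s.1 + d.getD k 0)) : Int × Int))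
      = pvSweep (pvDelta deps arrs) := by
    funext s k
    simp [pvSweep, hg]
  simp only [hsorted]
  rw [show (fun (s : Int × Int) k => (s.1 + d.getD k 0, min s.2 (s.1 + d.getD k 0))) = pvSweep (pvDelta deps arrs) from hstep]
  rw [← sweep_skip (pvDelta deps arrs) (fun t => d.contains t) pvLmins ?skip ((0 : Int), (0 : Int)) (le_refl 0)]
  · have hle : (pvLmins.foldl (pvSweep (pvDelta deps arrs)) ((0 : Int), (0 : Int))).2 ≤ 0 :=
      sweep_snd_le _ _ _
    rw [abs_of_nonpos hle]
  case skip =>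
    intro t _ hf0
    have hf : d.contains t = false := hf0
    rw [hc] at hf
    simp only [Bool.or_eq_false_iff] at hf
    have h1 : deps.countP (fun p => pvMinute p.1 == some t) = 0 :=
      List.countP_eq_zero.mpr (fun p hp => by
        have := (List.any_eq_false.mp hf.1) p hp; simp_all)
    have h2 : arrs.countP (fun p => pvMinute p.2 == some t) = 0 :=
      List.countP_eq_zero.mpr (fun p hp => by
        have := (List.any_eq_false.mp hf.2) p hp; simp_all)
    simp [pvDelta, h1, h2]

-- A's nested minute loop equals the same full-day sweep, one per station
lemma A_fold_eq (AB BA : List ((Int × Int) × (Int × Int))) :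
    ((PySem.List.pyRange 0 24).foldl (fun s h =>
      (PySem.List.pyRange 0 60).foldl (fun s m =>
        let dA : Int := (AB.filter (fun t => t.1 == (h, m))).length
        let aA : Int := (BA.filter (fun t => t.2 == (h, m))).length
        let A := s.1 - dA + aA
        let dB : Int := (BA.filter (fun t => t.1 == (h, m))).length
        let aB : Int := (AB.filter (fun t => t.2 == (h, m))).length
        let B := s.2.2.1 - dB + aB
        ((A, min s.2.1 A, B, min s.2.2.2 B) : Int × Int × Int × Int)) s) ((0 : Int), (0 : Int), (0 : Int), (0 : Int)))
    = ((pvLmins.foldl (pvSweep (pvDelta AB BA)) (0, 0)).1,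
       (pvLmins.foldl (pvSweep (pvDelta AB BA)) (0, 0)).2,
       (pvLmins.foldl (pvSweep (pvDelta BA AB)) (0, 0)).1,
       (pvLmins.foldl (pvSweep (pvDelta BA AB)) (0, 0)).2) := by
  have hstep : ∀ h ∈ PySem.List.pyRange 0 24, ∀ m ∈ PySem.List.pyRange 0 60, ∀ s : Int × Int × Int × Int,
      (let dA : Int := (AB.filter (fun t => t.1 == (h, m))).length
       let aA : Int := (BA.filter (fun t => t.2 == (h, m))).length
       let A := s.1 - dA + aA
       let dB : Int := (BA.filter (fun t => t.1 == (h, m))).length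
       let aB : Int := (AB.filter (fun t => t.2 == (h, m))).length
       let B := s.2.2.1 - dB + aB
       ((A, min s.2.1 A, B, min s.2.2.2 B) : Int × Int × Int × Int))
      = ((pvSweep (pvDelta AB BA) (s.1, s.2.1) (h * 60 + m)).1,
         (pvSweep (pvDelta AB BA) (s.1, s.2.1) (h * 60 + m)).2,
         (pvSweep (pvDelta BA AB) (s.2.2.1, s.2.2.2) (h * 60 + m)).1,
         (pvSweep (pvDelta BA AB) (s.2.2.1, s.2.2.2) (h * 60 + m)).2) := by
    intro h hh m hm s
    rw [PySem.List.mem_pyRange_one] at hh hm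
    have e1 := count_dep_eq hh hm AB
    have e2 := count_arr_eq hh hm BA
    have e3 := count_dep_eq hh hm BA
    have e4 := count_arr_eq hh hm AB
    simp only [pvSweep, pvDelta, e1, e2, e3, e4]
    refine Prod.ext (by push_cast; ring) (Prod.ext (by push_cast; ring_nf) (Prod.ext (by push_cast; ring) (by push_cast; ring_nf)))
  rw [PySem.List.foldl_congr_mem _ _
    (fun s h => (PySem.List.pyRange 0 60).foldl (fun s m =>
        ((pvSweep (pvDelta AB BA) (s.1, s.2.1) (h * 60 + m)).1,
         (pvSweep (pvDelta AB BA) (s.1, s.2.1) (h * 60 + m)).2,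
         (pvSweep (pvDelta BA AB) (s.2.2.1, s.2.2.2) (h * 60 + m)).1,
         (pvSweep (pvDelta BA AB) (s.2.2.1, s.2.2.2) (h * 60 + m)).2)) s) _
    (fun s h hh => PySem.List.foldl_congr_mem _ _ _ s (fun s' m hm => hstep h hh m hm s'))]
  have hflat : ∀ init : Int × Int × Int × Int,
      (PySem.List.pyRange 0 24).foldl (fun s h => (PySem.List.pyRange 0 60).foldl (fun s m =>
        ((pvSweep (pvDelta AB BA) (s.1, s.2.1) (h * 60 + m)).1,
         (pvSweep (pvDelta AB BA) (s.1, s.2.1) (h * 60 + m)).2,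
         (pvSweep (pvDelta BA AB) (s.2.2.1, s.2.2.2) (h * 60 + m)).1,
         (pvSweep (pvDelta BA AB) (s.2.2.1, s.2.2.2) (h * 60 + m)).2)) s) init
      = pvLmins.foldl (fun s t =>
        ((pvSweep (pvDelta AB BA) (s.1, s.2.1) t).1,
         (pvSweep (pvDelta AB BA) (s.1, s.2.1) t).2,
         (pvSweep (pvDelta BA AB) (s.2.2.1, s.2.2.2) t).1,
         (pvSweep (pvDelta BA AB) (s.2.2.1, s.2.2.2) t).2)) init := by
    intro init
    unfold pvLmins
    rw [List.foldl_flatMap]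
    exact PySem.List.foldl_congr_mem _ _ _ init (fun s h _ => by rw [List.foldl_map])
  rw [hflat]
  exact foldl4 pvLmins (pvSweep (pvDelta AB BA)) (pvSweep (pvDelta BA AB)) (0, 0) (0, 0)

-- ===== VERDICT (by name: the statement is the Claim_ definition above) =====
theorem TrainTimetable_spec : Claim_equal_TrainTimetable := by
  intro AB BA _
  unfold Spec_TrainTimetable TrainTimetable TrainTimetable_alt
  rw [A_fold_eq AB BA, pvNeed_eq_sweep AB BA, pvNeed_eq_sweep BA AB]
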